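-- pv_equiv track=rewrite | github.com/sethlsx/cn-python-foundation | investigate texts and calls/ZH/Task3.py | qianzhui
-- ===== SOURCE A (Python) =====
-- def qianzhui(haoma_list):
-- 	qianzhuiliebiao = []
-- 	for haoma in haoma_list:
-- 		if haoma[0] == '(':
-- 			l = 0
-- 			for i in range(len(haoma)):
-- 				if haoma[i] == ')':
-- 					l = i + 1
-- 					break
-- 				else:
-- 					pass
-- 			if haoma[:l] not in qianzhuiliebiao:
-- 				qianzhuiliebiao.append(haoma[:l])
-- 		elif haoma[0] == '7' or haoma[0] == '8' or haoma[0] == '9':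
-- 			if haoma[:4] not in qianzhuiliebiao:
-- 				qianzhuiliebiao.append(haoma[:4])
-- 		else:
-- 			pass
-- 	return qianzhuiliebiao
-- ===== SOURCE B (Python) =====
-- def qianzhui(haoma_list):
--     # Walk the list backwards, overwriting first[prefix] with the current index,
--     # so each prefix ends mapped to its FIRST occurrence index; then order the
--     # distinct prefixes by that index.
--     first = {}
--     for idx in range(len(haoma_list) - 1, -1, -1):
--         haoma = haoma_list[idx]
--         c = haoma[0]
--         if c == '(':
--             first[haoma[:haoma.find(')') + 1]] = idx
--         elif c in '789':
--             first[haoma[:4]] = idx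
--         else:
--             pass
--     return sorted(first, key=first.get)
-- ===== Notes on version B (the rewrite author's own statement) =====
-- stated objective: alternative
-- what changed: Instead of A's forward loop that dedups by membership-testing a growing list, B walks the list BACKWARDS overwriting a dict entry prefix->index so each prefix ends at its first-occurrence index, then sorts the distinct prefixes by that index; correct because first-occurrence indices of distinct prefixes are distinct and A's output is exactly the distinct prefixes in increasing first-occurrence order.
import Mathlib
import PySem

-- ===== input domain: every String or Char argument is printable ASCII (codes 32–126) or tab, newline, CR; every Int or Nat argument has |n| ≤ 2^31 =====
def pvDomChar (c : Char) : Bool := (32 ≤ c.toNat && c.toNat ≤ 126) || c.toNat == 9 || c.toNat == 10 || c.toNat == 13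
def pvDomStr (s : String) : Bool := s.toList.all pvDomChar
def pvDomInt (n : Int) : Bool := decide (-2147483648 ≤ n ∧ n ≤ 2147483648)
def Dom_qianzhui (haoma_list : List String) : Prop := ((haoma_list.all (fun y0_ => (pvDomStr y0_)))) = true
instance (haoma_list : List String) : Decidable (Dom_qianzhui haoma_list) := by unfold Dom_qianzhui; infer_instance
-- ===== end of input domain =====

-- B replaces A's forward dedup-by-membership loop by a BACKWARD index loop that overwrites a
-- dict entry prefix -> index (so each prefix ends at its first-occurrence index) followed by a
-- sort of the distinct prefixes by that index; same results, different algorithm.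

-- ===== PORT A =====
-- inner 'for i in range(len(haoma)): if haoma[i] == ")": l = i + 1; break' with initial l = 0
def qianzhuiL (haoma : String) (idxs : List Int) (l : Int) : Int :=
  match idxs with
  | [] => l
  | i :: rest =>
    if PySem.Str.pyGet? haoma i = some ')' then i + 1
    else qianzhuiL haoma rest l

-- body of A's outer 'for haoma in haoma_list' loop
def qianzhuiStep (acc : List String) (haoma : String) : List String :=
  if PySem.Str.pyGet? haoma 0 = some '(' then
    let l := qianzhuiL haoma (PySem.List.pyRange 0 (PySem.Str.len haoma) 1) 0
    let p := PySem.Str.slice haoma none (some l)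
    if p ∈ acc then acc else acc ++ [p]
  else if PySem.Str.pyGet? haoma 0 = some '7' ∨ PySem.Str.pyGet? haoma 0 = some '8'
          ∨ PySem.Str.pyGet? haoma 0 = some '9' then
    let p := PySem.Str.slice haoma none (some 4)
    if p ∈ acc then acc else acc ++ [p]
  else acc

def qianzhui (haoma_list : List String) : List String :=
  haoma_list.foldl qianzhuiStep []

-- ===== PORT B =====
-- body of Source B's 'for idx in range(len(haoma_list) - 1, -1, -1)' loop
def qianzhuiAltStep (haoma_list : List String) (first : PySem.Dict String Int) (idx : Int)
    : PySem.Dict String Int :=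
  match PySem.List.pyGet? haoma_list idx with
  | none => first          -- unreachable: idx ranges over valid indices
  | some haoma =>
    match PySem.Str.pyGet? haoma 0 with
    | none => first        -- haoma[0] raises IndexError on "": outside Pre_
    | some c =>
      if c = '(' then
        first.insert (PySem.Str.slice haoma none (some (PySem.Str.find haoma ")" + 1))) idx
      else if PySem.Chars.isIn [c] "789".toList then
        first.insert (PySem.Str.slice haoma none (some 4)) idx
      else first

-- sorted(first, key=first.get): every key of 'first' is present, so first.get k is its stored
-- index; getD … 0 computes exactly that value on the keys being sorted
def qianzhui_alt (haoma_list : List String) : List String :=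
  let first := (PySem.List.pyRange ((haoma_list.length : Int) - 1) (-1) (-1)).foldl
      (qianzhuiAltStep haoma_list) PySem.Dict.empty
  PySem.List.sorted first.keys (fun k => first.getD k 0)

-- ===== PRECONDITION & SPEC =====
-- Pre_ excludes lists containing an empty string: there A (and B) raise IndexError on haoma[0].
def Pre_qianzhui (haoma_list : List String) : Prop := ∀ s ∈ haoma_list, s ≠ ""
instance (haoma_list : List String) : Decidable (Pre_qianzhui haoma_list) := by unfold Pre_qianzhui; infer_instance
def pvWitness_qianzhui : List String := ["(12)345", "789x", "(nope", "7890", "(12)999", "1x"]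

def Spec_qianzhui (haoma_list : List String) (out : List String) : Prop := out = qianzhui_alt haoma_list
instance (haoma_list : List String) (out : List String) : Decidable (Spec_qianzhui haoma_list out) := by unfold Spec_qianzhui; infer_instance

-- ===== CLAIM (what is proved, stated in full; the proofs are below) =====
def Claim_equal_qianzhui : Prop := ∀ (haoma_list : List String), Dom_qianzhui haoma_list → Pre_qianzhui haoma_list → Spec_qianzhui haoma_list (qianzhui haoma_list)

-- ===== LEMMAS AND PROOFS =====

-- the prefix a number contributes, if any (shared characterization of both loop bodies)
def prefixOf (haoma : String) : Option String :=
  match PySem.Str.pyGet? haoma 0 with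
  | none => none
  | some c =>
    if c = '(' then some (PySem.Str.slice haoma none (some (PySem.Str.find haoma ")" + 1)))
    else if PySem.Chars.isIn [c] "789".toList then some (PySem.Str.slice haoma none (some 4))
    else none

-- the (prefix, index) pairs in forward order
def pvPairs (haoma_list : List String) (i0 : Int) : List (String × Int) :=
  match haoma_list with
  | [] => []
  | s :: rest =>
    match prefixOf s with
    | none => pvPairs rest (i0 + 1)
    | some p => (p, i0) :: pvPairs rest (i0 + 1)

def pvIns (d : PySem.Dict String Int) (q : String × Int) : PySem.Dict String Int :=
  d.insert q.1 q.2

theorem singleton_prefix_iff {α : Type} (c : α) (l : List α) : [c] <+: l ↔ l[0]? = some c := by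
  cases l with
  | nil => simp
  | cons a t =>
    constructor
    · rintro ⟨u, hu⟩
      simp at hu
      simp [hu.1]
    · intro h
      simp at h
      exact ⟨t, by simp [h]⟩

theorem qianzhuiL_eq_zero (haoma : String) (idxs : List Int)
    (h : ∀ i ∈ idxs, PySem.Str.pyGet? haoma i ≠ some ')') :
    qianzhuiL haoma idxs 0 = 0 := by
  induction idxs with
  | nil => rfl
  | cons i rest ih =>
    have hi := h i (by simp)
    simp only [qianzhuiL, if_neg hi]
    exact ih (fun j hj => h j (by simp [hj]))

theorem qianzhuiL_first (haoma : String) (pre : List Int) (i : Int) (suf : List Int)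
    (hpre : ∀ j ∈ pre, PySem.Str.pyGet? haoma j ≠ some ')')
    (hi : PySem.Str.pyGet? haoma i = some ')') :
    qianzhuiL haoma (pre ++ i :: suf) 0 = i + 1 := by
  induction pre with
  | nil =>
    rw [List.nil_append]
    unfold qianzhuiL
    rw [if_pos hi]
  | cons j rest ih =>
    have hj := hpre j (by simp)
    simp only [List.cons_append, qianzhuiL, if_neg hj]
    exact ih (fun k hk => hpre k (by simp [hk]))

theorem qianzhuiL_eq_find (haoma : String) :
    qianzhuiL haoma (PySem.List.pyRange 0 (PySem.Str.len haoma) 1) 0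
      = PySem.Str.find haoma ")" + 1 := by
  have hfind : PySem.Str.find haoma ")" = PySem.Chars.find haoma.toList [')'] := by
    simp [PySem.Str.find_eq]
  have hget : ∀ j : Int, PySem.Str.pyGet? haoma j = PySem.List.pyGet? haoma.toList j := by
    intro j; simp
  have hlen : PySem.Str.len haoma = (haoma.toList.length : Int) := by simp
  by_cases hpos : 0 ≤ PySem.Chars.find haoma.toList [')']
  · -- found: find points at the first ')'
    obtain ⟨hpref, hmin⟩ := PySem.Chars.find_spec hpos
    set k := PySem.Chars.find haoma.toList [')'] with hk
    have hklen : k ≤ (haoma.toList.length : Int) := PySem.Chars.find_le_length haoma.toList [')']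
    have hat : haoma.toList[k.toNat]? = some ')' := by
      have := (singleton_prefix_iff ')' (haoma.toList.drop k.toNat)).mp hpref
      simpa [List.getElem?_drop] using this
    have hklt : k < (haoma.toList.length : Int) := by
      rcases lt_or_eq_of_le hklen with h | h
      · exact h
      · exfalso
        have : haoma.toList[k.toNat]? = none := by
          apply List.getElem?_eq_none
          omega
        simp [this] at hat
    have hsplit : PySem.List.pyRange 0 (PySem.Str.len haoma) 1
        = PySem.List.pyRange 0 k 1 ++ k :: PySem.List.pyRange (k + 1) (PySem.Str.len haoma) 1 := by
      rw [PySem.List.pyRange_one_append 0 k (PySem.Str.len haoma) hpos (by rw [hlen]; exact hklen),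
          PySem.List.pyRange_one_cons (show k < PySem.Str.len haoma by rw [hlen]; exact hklt)]
    rw [hsplit, qianzhuiL_first, hfind]
    · intro j hj
      have hjr := (PySem.List.mem_pyRange_one).mp hj
      intro hcon
      rw [hget] at hcon
      have hj0 : 0 ≤ j := hjr.1
      have hjk : j < k := hjr.2
      have hjval : haoma.toList[j.toNat]? = some ')' := by
        rw [PySem.List.pyGet?_of_nonneg _ hj0] at hcon
        exact hcon
      apply hmin j.toNat (by omega)
      rw [singleton_prefix_iff]
      simpa [List.getElem?_drop] using hjval
    · rw [hget, PySem.List.pyGet?_of_nonneg _ hpos]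
      exact hat
  · -- not found: find = -1, no ')' anywhere, l stays 0
    have hm1 : PySem.Chars.find haoma.toList [')'] = -1 := by
      have := PySem.Chars.neg_one_le_find haoma.toList [')']
      omega
    have hnotin : ¬ ([')'] <:+: haoma.toList) := (PySem.Chars.find_eq_neg_one_iff _ _).mp hm1
    have hz : qianzhuiL haoma (PySem.List.pyRange 0 (PySem.Str.len haoma) 1) 0 = 0 := by
      apply qianzhuiL_eq_zero
      intro i hi
      have hir := (PySem.List.mem_pyRange_one).mp hi
      intro hcon
      rw [hget, PySem.List.pyGet?_of_nonneg _ hir.1] at hcon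
      apply hnotin
      have hp : [')'] <+: haoma.toList.drop i.toNat := by
        rw [singleton_prefix_iff]
        simpa [List.getElem?_drop] using hcon
      exact hp.isInfix.trans (List.drop_suffix _ _).isInfix
    rw [hz, hfind, hm1]
    norm_num

theorem isIn_singleton_789 (c : Char) :
    PySem.Chars.isIn [c] ['7', '8', '9'] = true ↔ (c = '7' ∨ c = '8' ∨ c = '9') := by
  rw [PySem.Chars.isIn_iff_infix]
  constructor
  · intro h
    have hc : c ∈ ['7', '8', '9'] := h.sublist.subset (by simp)
    simpa using hc
  · intro h
    have hc : c ∈ ['7', '8', '9'] := by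
      rcases h with h | h | h <;> simp [h]
    obtain ⟨s, t, hst⟩ := List.append_of_mem hc
    exact ⟨s, t, by simp [hst]⟩

-- A's loop body acts on the accumulator through prefixOf
theorem step_eq (acc : List String) (haoma : String) :
    qianzhuiStep acc haoma
      = match prefixOf haoma with
        | none => acc
        | some p => if p ∈ acc then acc else acc ++ [p] := by
  unfold qianzhuiStep prefixOf
  cases hg : PySem.Str.pyGet? haoma 0 with
  | none => simp
  | some c =>
    by_cases h1 : c = '('
    · subst h1
      rw [qianzhuiL_eq_find]
      simp
    · by_cases h2 : c = '7' ∨ c = '8' ∨ c = '9'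
      · have hin : PySem.Chars.isIn [c] ['7', '8', '9'] = true := (isIn_singleton_789 c).mpr h2
        rcases h2 with rfl | rfl | rfl <;> simp [hin]
      · have hin : PySem.Chars.isIn [c] ['7', '8', '9'] = false := by
          rcases hb : PySem.Chars.isIn [c] ['7', '8', '9'] with _ | _
          · rfl
          · exact absurd ((isIn_singleton_789 c).mp hb) h2
        have h7 : c ≠ '7' := fun h => h2 (Or.inl h)
        have h8 : c ≠ '8' := fun h => h2 (Or.inr (Or.inl h))
        have h9 : c ≠ '9' := fun h => h2 (Or.inr (Or.inr h))
        simp [h1, h7, h8, h9, hin]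

theorem foldl_step_eq (haoma_list : List String) (acc : List String) :
    haoma_list.foldl qianzhuiStep acc
      = (haoma_list.filterMap prefixOf).foldl PySem.Set.add acc := by
  induction haoma_list generalizing acc with
  | nil => rfl
  | cons x xs ih =>
    simp only [List.foldl_cons, List.filterMap_cons]
    rw [step_eq]
    cases hp : prefixOf x with
    | none => simpa using ih acc
    | some p =>
      simp only [List.foldl_cons]
      rw [ih]
      congr 1
      rw [PySem.Set.add_eq_ite]

-- pvPairs projects to the filterMap of prefixes
theorem pvPairs_map_fst (haoma_list : List String) (i0 : Int) :
    (pvPairs haoma_list i0).map Prod.fst = haoma_list.filterMap prefixOf := by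
  induction haoma_list generalizing i0 with
  | nil => rfl
  | cons x xs ih =>
    simp only [pvPairs, List.filterMap_cons]
    cases prefixOf x with
    | none => exact ih (i0 + 1)
    | some p => simp [ih]

theorem pvPairs_snd_bounds (haoma_list : List String) (i0 : Int) :
    ∀ q ∈ pvPairs haoma_list i0, i0 ≤ q.2 ∧ q.2 < i0 + haoma_list.length := by
  induction haoma_list generalizing i0 with
  | nil => simp [pvPairs]
  | cons x xs ih =>
    intro q hq
    simp only [pvPairs] at hq
    cases hp : prefixOf x with
    | none =>
      rw [hp] at hq
      have := ih (i0 + 1) q hq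
      constructor <;> [omega; (simp only [List.length_cons]; push_cast; omega)]
    | some p =>
      rw [hp] at hq
      rcases List.mem_cons.mp hq with h | h
      · subst h
        constructor
        · exact le_refl _
        · simp only [List.length_cons]; push_cast; omega
      · have := ih (i0 + 1) q h
        constructor <;> [omega; (simp only [List.length_cons]; push_cast; omega)]

theorem pvPairs_snd_sorted (haoma_list : List String) (i0 : Int) :
    ((pvPairs haoma_list i0).map Prod.snd).Pairwise (· < ·) := by
  induction haoma_list generalizing i0 with
  | nil => simp [pvPairs]
  | cons x xs ih =>
    simp only [pvPairs]
    cases prefixOf x with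
    | none => exact ih (i0 + 1)
    | some p =>
      simp only [List.map_cons]
      refine List.pairwise_cons.mpr ⟨?_, ih (i0 + 1)⟩
      intro j hj
      obtain ⟨q, hq, rfl⟩ := List.mem_map.mp hj
      have := (pvPairs_snd_bounds xs (i0 + 1) q hq).1
      omega

theorem pvPairs_append (ys : List String) (s : String) (i0 : Int) :
    pvPairs (ys ++ [s]) i0
      = pvPairs ys i0
        ++ (match prefixOf s with
            | none => []
            | some p => [(p, i0 + ys.length)]) := by
  induction ys generalizing i0 with
  | nil =>
    simp only [List.nil_append, pvPairs]
    cases prefixOf s <;> simp [pvPairs]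
  | cons y ys ih =>
    simp only [List.cons_append, pvPairs]
    cases prefixOf y with
    | none =>
      rw [ih]
      congr 2
      cases prefixOf s <;> simp <;> push_cast <;> ring_nf
    | some p =>
      simp only [List.cons_append]
      rw [ih]
      congr 2
      cases prefixOf s <;> simp <;> push_cast <;> ring_nf

-- B's loop body acts on the dict through prefixOf of the indexed element
theorem altStep_eq (haoma_list : List String) (d : PySem.Dict String Int) (i : Int)
    (hi : 0 ≤ i) :
    qianzhuiAltStep haoma_list d i
      = match haoma_list[i.toNat]? with
        | none => d
        | some s =>
          match prefixOf s with
          | none => d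
          | some p => d.insert p i := by
  unfold qianzhuiAltStep prefixOf
  rw [PySem.List.pyGet?_of_nonneg _ hi]
  cases haoma_list[i.toNat]? with
  | none => rfl
  | some s =>
    cases hg : PySem.Str.pyGet? s 0 with
    | none => simp only [hg]
    | some c =>
      simp only [hg]
      split_ifs <;> rfl

-- folding B's step over in-range indices = folding plain inserts over the indexed pairs
theorem foldl_altStep_eq (haoma_list : List String) (idxs : List Int) (d : PySem.Dict String Int)
    (hb : ∀ i ∈ idxs, 0 ≤ i ∧ i.toNat < haoma_list.length) :
    idxs.foldl (qianzhuiAltStep haoma_list) d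
      = (idxs.filterMap
          (fun i => (haoma_list[i.toNat]?.bind prefixOf).map (fun p => (p, i)))).foldl pvIns d := by
  induction idxs generalizing d with
  | nil => rfl
  | cons i rest ih =>
    have hib := hb i (by simp)
    simp only [List.foldl_cons, List.filterMap_cons]
    rw [altStep_eq haoma_list d i hib.1]
    cases hg : haoma_list[i.toNat]? with
    | none =>
      simp only [Option.bind_none, Option.map_none]
      exact ih d (fun j hj => hb j (by simp [hj]))
    | some s =>
      cases hp : prefixOf s with
      | none =>
        simp only [Option.bind_some, hp, Option.map_none]
        exact ih d (fun j hj => hb j (by simp [hj]))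
      | some p =>
        simp only [Option.bind_some, hp, Option.map_some, List.foldl_cons]
        exact ih _ (fun j hj => hb j (by simp [hj]))

-- the backward index range, as a reversed forward range
theorem pyRange_back (n : Nat) :
    PySem.List.pyRange ((n : Int) - 1) (-1) (-1) = ((List.range n).map (fun k : Nat => (k : Int))).reverse := by
  unfold PySem.List.pyRange
  rcases Nat.eq_zero_or_pos n with rfl | hn
  · simp
  · have h3 : (-1 : Int) < (n : Int) - 1 := by omega
    norm_num [h3]
    apply List.ext_getElem
    · simp
    · intro i hi1 hi2
      simp only [List.getElem_map, List.getElem_range, List.getElem_reverse, List.length_map,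
        List.length_range]
      simp only [List.length_map, List.length_range] at hi1 hi2
      omega

-- get? of a fold of inserts: the LAST inserted value for the key, else the initial dict's
theorem get?_foldl_ins (L : List (String × Int)) (d : PySem.Dict String Int) (p : String) :
    (L.foldl pvIns d).get? p
      = match L.reverse.find? (fun q => q.1 == p) with
        | some q => some q.2
        | none => d.get? p := by
  induction L generalizing d with
  | nil => rfl
  | cons a L ih =>
    simp only [List.foldl_cons, List.reverse_cons, ih, List.find?_append]
    cases hf : L.reverse.find? (fun q => q.1 == p) with
    | some q => simp only [Option.some_or]
    | none =>
      simp only [Option.none_or]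
      by_cases hpa : p = a.1
      · subst hpa
        have ht : ((fun q : String × Int => q.1 == a.1) a) = true := by simp
        rw [show List.find? (fun q : String × Int => q.1 == a.1) [a] = some a from
          List.find?_cons_of_pos ht]
        exact PySem.Dict.get?_insert_self d a.1 a.2
      · have hne : ((fun q : String × Int => q.1 == p) a) = false :=
          beq_eq_false_iff_ne.mpr (fun he => hpa he.symm)
        rw [show List.find? (fun q : String × Int => q.1 == p) [a] = none from by
          rw [List.find?_cons_of_neg (by simp [hne]), List.find?_nil]]
        exact PySem.Dict.get?_insert_of_ne d a.2 hpa

theorem keys_insert' (d : PySem.Dict String Int) (k : String) (v : Int) :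
    (d.insert k v).keys = if d.contains k then d.keys else d.keys ++ [k] := by
  by_cases h : d.contains k
  · simp only [PySem.Dict.insert, h, if_true, PySem.Dict.keys, List.map_map]
    congr 1
    funext q
    by_cases hq : (q.1 == k) = true
    · simp only [Function.comp, hq, if_true]
      simp only [beq_iff_eq] at hq
      exact hq.symm
    · simp [Function.comp, hq]
  · simp [PySem.Dict.insert, h, PySem.Dict.keys]

theorem mem_keys_iff_contains (d : PySem.Dict String Int) (p : String) :
    p ∈ d.keys ↔ d.contains p = true := by
  unfold PySem.Dict.keys PySem.Dict.contains
  rw [List.any_eq_true]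
  constructor
  · intro hm
    obtain ⟨q, hq, hx⟩ := List.mem_map.mp hm
    exact ⟨q, hq, by simp [hx]⟩
  · rintro ⟨q, hq, hx⟩
    exact List.mem_map.mpr ⟨q, hq, by simpa using hx⟩

theorem contains_foldl_ins (L : List (String × Int)) (d : PySem.Dict String Int) (p : String) :
    (L.foldl pvIns d).contains p = (L.any (fun q => q.1 == p) || d.contains p) := by
  induction L generalizing d with
  | nil => simp
  | cons a L ih =>
    simp only [List.foldl_cons, ih, List.any_cons, pvIns]
    rw [PySem.Dict.contains_insert]
    have hsym : (p == a.1) = (a.1 == p) := by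
      cases h : (a.1 == p)
      · exact beq_eq_false_iff_ne.mpr (fun he => (beq_eq_false_iff_ne.mp h) he.symm)
      · have hpe : a.1 = p := beq_iff_eq.mp h
        simp [hpe]
    rw [hsym]
    cases (a.1 == p) <;> simp

theorem nodup_keys_foldl_ins (L : List (String × Int)) (d : PySem.Dict String Int)
    (hd : d.keys.Nodup) : (L.foldl pvIns d).keys.Nodup := by
  induction L generalizing d with
  | nil => exact hd
  | cons a L ih =>
    refine ih _ ?_
    rw [pvIns, keys_insert']
    by_cases h : d.contains a.1
    · simpa [h] using hd
    · simp only [h, if_neg]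
      refine List.Nodup.append hd (by simp) ?_
      rw [List.disjoint_singleton]
      exact fun hm => h ((mem_keys_iff_contains d a.1).mp hm)

-- ordered dedup of the firsts is ordered by first-occurrence index
theorem dedup_pairwise_firstIdx (Q : List (String × Int))
    (hs : (Q.map Prod.snd).Pairwise (· < ·)) :
    (PySem.Set.ofList (Q.map Prod.fst) : List String).Pairwise
      (fun a b => (((Q.find? (fun q => q.1 == a)).map Prod.snd).getD 0)
                < (((Q.find? (fun q => q.1 == b)).map Prod.snd).getD 0)) := by
  induction Q using List.reverseRecOn with
  | nil => simp [PySem.Set.ofList]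
  | append_singleton Q a ih =>
    have hsQ : (Q.map Prod.snd).Pairwise (· < ·) := by
      rw [List.map_append] at hs
      exact (List.pairwise_append.mp hs).1
    have hlt : ∀ q ∈ Q, q.2 < a.2 := by
      rw [List.map_append] at hs
      intro q hq
      exact (List.pairwise_append.mp hs).2.2 q.2 (List.mem_map_of_mem hq) a.2 (by simp)
    have hP := ih hsQ
    have hagree : ∀ b ∈ (PySem.Set.ofList (Q.map Prod.fst) : List String),
        ((Q ++ [a]).find? (fun q => q.1 == b)) = (Q.find? (fun q => q.1 == b)) := by
      intro b hb
      have hbm : b ∈ Q.map Prod.fst := (PySem.Set.mem_ofList _ _).mp hb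
      obtain ⟨q, hq, hqb⟩ := List.mem_map.mp hbm
      have hsome : (Q.find? (fun q => q.1 == b)).isSome := by
        rw [List.find?_isSome]
        exact ⟨q, hq, by simp [hqb]⟩
      rw [List.find?_append]
      cases hf : Q.find? (fun q => q.1 == b) with
      | none => rw [hf] at hsome; simp at hsome
      | some q' => simp
    have hofl : (PySem.Set.ofList ((Q ++ [a]).map Prod.fst) : List String)
        = PySem.Set.add (PySem.Set.ofList (Q.map Prod.fst)) a.1 := by
      simp [PySem.Set.ofList, List.map_append, List.foldl_append]
    rw [hofl, PySem.Set.add_eq_ite]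
    by_cases hmem : a.1 ∈ (PySem.Set.ofList (Q.map Prod.fst) : List String)
    · rw [if_pos hmem]
      refine hP.imp_of_mem ?_
      intro b c hb hc h
      rw [hagree b hb, hagree c hc]
      exact h
    · rw [if_neg hmem]
      rw [List.pairwise_append]
      refine ⟨hP.imp_of_mem ?_, by simp, ?_⟩
      · intro b c hb hc h
        rw [hagree b hb, hagree c hc]
        exact h
      · intro b hb c hc
        simp only [List.mem_singleton] at hc
        subst hc
        have hbm : b ∈ Q.map Prod.fst := (PySem.Set.mem_ofList _ _).mp hb
        obtain ⟨q, hq, hqb⟩ := List.mem_map.mp hbm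
        have hsome : (Q.find? (fun q => q.1 == b)).isSome := by
          rw [List.find?_isSome]
          exact ⟨q, hq, by simp [hqb]⟩
        obtain ⟨q', hq'⟩ := Option.isSome_iff_exists.mp hsome
        have hq'mem : q' ∈ Q := List.mem_of_find?_eq_some hq'
        have hnone : Q.find? (fun q => q.1 == a.1) = none := by
          rw [List.find?_eq_none]
          intro x hx hxp
          exact hmem ((PySem.Set.mem_ofList _ _).mpr
            (List.mem_map.mpr ⟨x, hx, beq_iff_eq.mp hxp⟩))
        have hfa : ((Q ++ [a]).find? (fun q => q.1 == a.1)) = some a := by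
          rw [List.find?_append, hnone, Option.none_or]
          exact List.find?_cons_of_pos (by simp)
        rw [hagree b hb, hfa, hq']
        simp only [Option.map_some, Option.getD_some]
        exact hlt q' hq'mem

-- the indexed extraction over range(len) is pvPairs
theorem range_filterMap_pairs (xs : List String) :
    ((List.range xs.length).map (fun k : Nat => (k : Int))).filterMap
      (fun i => (xs[i.toNat]?.bind prefixOf).map (fun p => (p, i))) = pvPairs xs 0 := by
  induction xs using List.reverseRecOn with
  | nil => simp [pvPairs]
  | append_singleton ys s ih =>
    rw [List.length_append, List.length_singleton, List.range_succ, List.map_append,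
      List.filterMap_append, pvPairs_append]
    congr 1
    · rw [← ih]
      apply List.filterMap_congr
      intro x hx
      obtain ⟨k, hk, rfl⟩ := List.mem_map.mp hx
      rw [List.mem_range] at hk
      have hgl : (ys ++ [s])[(k : Int).toNat]? = ys[(k : Int).toNat]? := by
        apply List.getElem?_append_left
        simpa using hk
      rw [hgl]
    · simp only [List.map_cons, List.map_nil, List.filterMap_cons, List.filterMap_nil]
      have hg : (ys ++ [s])[((ys.length : Int)).toNat]? = some s := by
        simpa using List.getElem?_concat_length
      rw [hg]
      cases hp : prefixOf s with
      | none => simp [hp]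
      | some p => simp [hp]

-- ===== VERDICT (by name: the statement is the Claim_ definition above) =====
theorem qianzhui_spec : Claim_equal_qianzhui := by
  intro xs _ _
  unfold Spec_qianzhui qianzhui qianzhui_alt
  rw [foldl_step_eq, ← pvPairs_map_fst xs 0, ← PySem.Set.ofList_eq_foldl]
  rw [pyRange_back xs.length,
      foldl_altStep_eq xs _ _ (by
        intro i hi
        rw [List.mem_reverse] at hi
        obtain ⟨k, hk, rfl⟩ := List.mem_map.mp hi
        rw [List.mem_range] at hk
        constructor
        · positivity
        · simpa using hk),
      List.filterMap_reverse, range_filterMap_pairs]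
  set P := pvPairs xs 0 with hP
  set d := (P.reverse).foldl pvIns PySem.Dict.empty with hd
  have hget : ∀ p, d.get? p
      = match P.find? (fun q => q.1 == p) with
        | some q => some q.2
        | none => none := by
    intro p
    rw [hd, get?_foldl_ins, List.reverse_reverse]
    cases P.find? (fun q => q.1 == p) with
    | none => simp [PySem.Dict.get?, PySem.Dict.empty]
    | some q => simp
  have hkey : ∀ p, d.getD p 0 = ((P.find? (fun q => q.1 == p)).map Prod.snd).getD 0 := by
    intro p
    show (d.get? p).getD 0 = _
    rw [hget]
    cases P.find? (fun q => q.1 == p) with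
    | none => simp
    | some q => simp
  have hcont : ∀ p, d.contains p = P.any (fun q => q.1 == p) := by
    intro p
    rw [hd, contains_foldl_ins, List.any_reverse]
    simp [PySem.Dict.contains, PySem.Dict.empty]
  have hperm : (PySem.Set.ofList (P.map Prod.fst) : List String).Perm d.keys := by
    rw [List.perm_ext_iff_of_nodup (PySem.Set.nodup_ofList _)
      (nodup_keys_foldl_ins _ _ (by simp [PySem.Dict.keys, PySem.Dict.empty]))]
    intro p
    rw [PySem.Set.mem_ofList, mem_keys_iff_contains, hcont, List.any_eq_true]
    constructor
    · intro hm
      obtain ⟨q, hq, hqp⟩ := List.mem_map.mp hm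
      exact ⟨q, hq, by simp [hqp]⟩
    · rintro ⟨q, hq, hqp⟩
      exact List.mem_map.mpr ⟨q, hq, beq_iff_eq.mp hqp⟩
  have hpw : (PySem.Set.ofList (P.map Prod.fst) : List String).Pairwise
      (fun a b => d.getD a 0 < d.getD b 0) := by
    refine (dedup_pairwise_firstIdx P (pvPairs_snd_sorted xs 0)).imp ?_
    intro a b h
    rw [hkey a, hkey b]
    exact h
  exact (PySem.List.sorted_eq_of_perm_of_pairwise_lt d.keys _ _ hperm hpw).symm
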